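-- pv_equiv track=rewrite | github.com/lirikp/Python_algorithms_and_data_structures | lesson5.py | break_hex
-- ===== SOURCE A (Python) =====
-- from collections import defaultdict, OrderedDict, deque
--
-- def break_hex(hex):
--     isset_hex = deque('0123456789abcdef')
--     l = 0
--     for simb in hex:
--         if simb in isset_hex:
--             l += 1
--
--     if l == len(hex):
--         return True
--     else:
--         return False
-- ===== SOURCE B (Python) =====
-- def break_hex(hex):
--     # Stripping every hex digit from both ends leaves '' iff all chars are hex digits:
--     # if any non-hex char exists, the outermost one survives the strip.
--     return hex.strip('0123456789abcdef') == ''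
-- ===== Notes on version B (the rewrite author's own statement) =====
-- stated objective: simpler
-- what changed: Replaces the per-character membership-counting loop and final length comparison with a single str.strip call over the hex-digit characters: stripping them from both ends leaves the empty string exactly when every character is a hex digit, so no loop, counter or length check is written at all.
import Mathlib
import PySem

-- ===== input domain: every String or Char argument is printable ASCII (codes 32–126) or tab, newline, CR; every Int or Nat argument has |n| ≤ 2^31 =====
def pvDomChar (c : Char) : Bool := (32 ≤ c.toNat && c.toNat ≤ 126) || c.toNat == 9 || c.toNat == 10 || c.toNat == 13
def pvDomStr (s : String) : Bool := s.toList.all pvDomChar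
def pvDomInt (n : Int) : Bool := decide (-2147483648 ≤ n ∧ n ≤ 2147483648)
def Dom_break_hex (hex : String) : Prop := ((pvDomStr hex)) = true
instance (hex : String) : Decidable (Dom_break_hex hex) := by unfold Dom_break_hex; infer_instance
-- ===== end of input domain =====

-- B replaces A's membership-counting loop + length comparison with one
-- str.strip('0123456789abcdef') call compared against '' (simpler: no loop,
-- counter or length check is written).

-- ===== PORT A =====
-- deque('0123456789abcdef') — used only for membership, ported as its char list
def pvHexDigits : List Char := "0123456789abcdef".toList

def break_hex (hex : String) : Bool :=
  let isset_hex := pvHexDigits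
  let l : Int := hex.toList.foldl (fun l simb => if simb ∈ isset_hex then l + 1 else l) 0
  if l = PySem.Str.len hex then true else false

-- ===== PORT B =====
def break_hex_alt (hex : String) : Bool :=
  PySem.Str.stripChars hex "0123456789abcdef" == ""

-- ===== PRECONDITION & SPEC =====
def Spec_break_hex (hex : String) (out : Bool) : Prop := out = break_hex_alt hex
instance (hex : String) (out : Bool) : Decidable (Spec_break_hex hex out) := by unfold Spec_break_hex; infer_instance

-- ===== CLAIM (what is proved, stated in full; the proofs are below) =====
def Claim_equal_break_hex : Prop := ∀ (hex : String), Dom_break_hex hex → Spec_break_hex hex (break_hex hex)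

-- ===== LEMMAS AND PROOFS =====

-- A's counting loop as countP, peeled by structural induction
theorem foldl_hexcount (cs : List Char) (l : Int) :
    cs.foldl (fun l simb => if simb ∈ pvHexDigits then l + 1 else l) l
      = l + (cs.countP (· ∈ pvHexDigits) : Int) := by
  induction cs generalizing l with
  | nil => simp
  | cons c cs ih =>
    by_cases h : c ∈ pvHexDigits <;>
      simp [h, ih, add_assoc, add_comm]

-- A's side: count = length ↔ every char is a hex digit
theorem break_hex_eq_all (hex : String) :
    break_hex hex = hex.toList.all (· ∈ pvHexDigits) := by
  unfold break_hex
  simp only [foldl_hexcount, zero_add, PySem.Str.len_eq]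
  rcases h : hex.toList.all (· ∈ pvHexDigits) with _ | _
  · have : hex.toList.countP (· ∈ pvHexDigits) ≠ hex.toList.length := by
      intro hc
      have := List.countP_eq_length.mp hc
      simp only [List.all_eq_false] at h
      obtain ⟨c, hc1, hc2⟩ := h
      exact hc2 (by simpa using this c hc1)
    rw [String.length_toList] at this
    simp [this]
  · have : hex.toList.countP (· ∈ pvHexDigits) = hex.toList.length :=
      List.countP_eq_length.mpr (by simpa [List.all_eq_true] using h)
    rw [String.length_toList] at this
    simp [this]

-- B's side: stripping hex digits from both ends leaves [] iff all chars are hex digits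
theorem break_hex_alt_eq_all (hex : String) :
    break_hex_alt hex = hex.toList.all (· ∈ pvHexDigits) := by
  unfold break_hex_alt
  apply Bool.eq_iff_iff.mpr
  rw [beq_iff_eq, ← String.toList_inj, PySem.Str.toList_stripChars]
  simp only [PySem.Chars.stripChars, List.reverse_eq_nil_iff, List.dropWhile_eq_nil_iff,
    List.mem_reverse, List.all_eq_true, String.toList_empty]
  constructor
  · intro h c hc
    by_cases hd : c ∈ (List.dropWhile (fun c => "0123456789abcdef".toList.contains c) hex.toList)
    · simpa [pvHexDigits, List.contains_iff_mem] using h c hd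
    · -- c was dropped by the front dropWhile, so it satisfies the predicate
      have hsplit := List.takeWhile_append_dropWhile
        (p := fun c => "0123456789abcdef".toList.contains c) (l := hex.toList)
      have : c ∈ List.takeWhile (fun c => "0123456789abcdef".toList.contains c) hex.toList := by
        rcases (List.mem_append.mp (by rw [hsplit]; exact hc)) with h1 | h1
        · exact h1
        · exact absurd h1 hd
      simpa [pvHexDigits, List.contains_iff_mem] using List.mem_takeWhile_imp this
  · intro h c hc
    have : c ∈ hex.toList := List.dropWhile_subset _ hc
    simpa [pvHexDigits, List.contains_iff_mem] using h c this

-- ===== VERDICT (by name: the statement is the Claim_ definition above) =====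
theorem break_hex_spec : Claim_equal_break_hex := by
  intro hex _
  unfold Spec_break_hex
  rw [break_hex_eq_all, break_hex_alt_eq_all]
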